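-- pv_equiv track=rewrite | github.com/klimzaporojets/TempEL | src/tempel_creation/misc/recursive_cleaning.py | detect_next_inside
-- ===== SOURCE A (Python) =====
-- def detect_next_inside(begin, end, pre_end, text_after):
--     # found, text_before, text_after = detect_next_inside(begin, end, pre_end, text_after)
--     # lst_type = ['BEGIN', 'END', 'PRE_END']
--     lst_to_match = [begin, end, pre_end]
--     min_pos = -1
--     min_pos_idx = -1
--     # for idx, (curr_type, curr_match) in enumerate(zip(lst_type, lst_to_match)):
--     for idx, curr_match in enumerate(lst_to_match):
--         try:
--             curr_pos = text_after.index(lst_to_match[idx])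
--             if min_pos_idx == -1:
--                 min_pos_idx = idx
--                 min_pos = curr_pos
--             else:
--                 if curr_pos < min_pos:
--                     min_pos = curr_pos
--                     min_pos_idx = idx
--         except ValueError:
--             pass
--     if min_pos == -1:
--         return None, None, None
--
--     return lst_to_match[min_pos_idx], text_after[:min_pos], \
--            text_after[min_pos + len(lst_to_match[min_pos_idx]):]
-- ===== SOURCE B (Python) =====
-- def detect_next_inside(begin, end, pre_end, text_after):
--     # Single left-to-right scan over the text: at each position, check whether any
--     # of the three tokens starts there; the first hit is the earliest occurrence,
--     # and checking tokens in list order at that position gives A's tie-break.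
--     subs = (begin, end, pre_end)
--     for pos in range(len(text_after) + 1):
--         for sub in subs:
--             if text_after.startswith(sub, pos):
--                 return sub, text_after[:pos], text_after[pos + len(sub):]
--     return None, None, None
-- ===== Notes on version B (the rewrite author's own statement) =====
-- stated objective: alternative
-- what changed: Replaces A's three independent str.index scans combined by a stateful min-tracking loop with a single position-major scan of the text that early-returns at the first position where any of the three tokens starts (tokens checked in list order, reproducing A's first-index tie-break).
import Mathlib
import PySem

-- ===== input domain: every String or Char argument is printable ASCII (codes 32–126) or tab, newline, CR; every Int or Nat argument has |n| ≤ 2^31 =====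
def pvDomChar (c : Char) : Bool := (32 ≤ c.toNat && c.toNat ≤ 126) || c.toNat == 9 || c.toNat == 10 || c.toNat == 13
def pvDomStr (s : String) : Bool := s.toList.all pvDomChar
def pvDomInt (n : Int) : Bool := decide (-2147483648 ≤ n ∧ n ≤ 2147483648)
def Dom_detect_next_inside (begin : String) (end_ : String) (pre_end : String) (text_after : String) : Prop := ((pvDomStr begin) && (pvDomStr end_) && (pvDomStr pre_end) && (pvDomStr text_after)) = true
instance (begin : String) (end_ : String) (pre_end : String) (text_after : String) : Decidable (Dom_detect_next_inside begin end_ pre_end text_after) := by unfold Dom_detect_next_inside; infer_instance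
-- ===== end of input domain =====

-- B replaces A's three independent substring scans combined by a stateful min-tracking loop with a
-- single position-major scan of the text that returns at the first position where any token starts
-- (tokens checked in list order, reproducing A's first-index tie-break); objective: alternative.

-- ===== PORT A =====
-- 'text_after.index(sub)' raises ValueError iff 'text_after.find(sub) == -1'; the try/except body is
-- ported exactly as: if find = -1 then pass (state unchanged) else proceed with curr_pos = find.
def detect_next_inside (begin : String) (end_ : String) (pre_end : String) (text_after : String) : Option String × Option String × Option String :=
  let lst_to_match := [begin, end_, pre_end]
  let st := (PySem.List.enumerate lst_to_match).foldl
    (fun (st : Int × Int) (p : Int × String) =>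
      let curr_pos := PySem.Str.find text_after (PySem.List.pyGetD lst_to_match p.1 "")
      if curr_pos = -1 then st            -- except ValueError: pass
      else if st.2 = -1 then (curr_pos, p.1)
      else if curr_pos < st.1 then (curr_pos, p.1)
      else st)
    (-1, -1)
  if st.1 = -1 then (none, none, none)
  else
    let m := PySem.List.pyGetD lst_to_match st.2 ""
    (some m, some (PySem.Str.slice text_after none (some st.1)),
     some (PySem.Str.slice text_after (some (st.1 + PySem.Str.len m)) none))

-- ===== PORT B =====
-- 'text_after.startswith(sub, pos)': exact for the 0 ≤ pos ≤ len(text_after) used here.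
def pvMatchAt (t : List Char) (sub : String) (pos : Nat) : Bool :=
  sub.toList.isPrefixOf (t.drop pos)

-- the 'for pos in range(...)' loop with its early return, as structural recursion over the positions
def pvScan (subs : List String) (t : List Char) : List Nat → Option (Nat × String)
  | [] => none
  | pos :: rest =>
    match subs.find? (fun s => pvMatchAt t s pos) with
    | some s => some (pos, s)
    | none => pvScan subs t rest

def detect_next_inside_alt (begin : String) (end_ : String) (pre_end : String) (text_after : String) : Option String × Option String × Option String :=
  let subs := [begin, end_, pre_end]
  match pvScan subs text_after.toList (List.range (text_after.toList.length + 1)) with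
  | none => (none, none, none)
  | some (pos, s) =>
    (some s, some (PySem.Str.slice text_after none (some (pos : Int))),
     some (PySem.Str.slice text_after (some ((pos : Int) + PySem.Str.len s)) none))

-- ===== PRECONDITION & SPEC =====
def Spec_detect_next_inside (begin : String) (end_ : String) (pre_end : String) (text_after : String) (out : Option String × Option String × Option String) : Prop := out = detect_next_inside_alt begin end_ pre_end text_after
instance (begin : String) (end_ : String) (pre_end : String) (text_after : String) (out : Option String × Option String × Option String) : Decidable (Spec_detect_next_inside begin end_ pre_end text_after out) := by unfold Spec_detect_next_inside; infer_instance

-- ===== CLAIM (what is proved, stated in full; the proofs are below) =====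
def Claim_equal_detect_next_inside : Prop := ∀ (begin : String) (end_ : String) (pre_end : String) (text_after : String), Dom_detect_next_inside begin end_ pre_end text_after → Spec_detect_next_inside begin end_ pre_end text_after (detect_next_inside begin end_ pre_end text_after)

-- ===== LEMMAS AND PROOFS =====

-- Shared closed form both ports are reduced to: the earliest of the three find positions,
-- ties to the smallest index; stated directly over the three finds.
def pvSel (b e p t : String) : Option String × Option String × Option String :=
  let n0 := PySem.Str.find t b
  let n1 := PySem.Str.find t e
  let n2 := PySem.Str.find t p
  if 0 ≤ n0 ∧ (n1 = -1 ∨ n0 ≤ n1) ∧ (n2 = -1 ∨ n0 ≤ n2) then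
    (some b, some (PySem.Str.slice t none (some n0)), some (PySem.Str.slice t (some (n0 + PySem.Str.len b)) none))
  else if 0 ≤ n1 ∧ (n2 = -1 ∨ n1 ≤ n2) then
    (some e, some (PySem.Str.slice t none (some n1)), some (PySem.Str.slice t (some (n1 + PySem.Str.len e)) none))
  else if 0 ≤ n2 then
    (some p, some (PySem.Str.slice t none (some n2)), some (PySem.Str.slice t (some (n2 + PySem.Str.len p)) none))
  else (none, none, none)

lemma pvMatchAt_of_find {t : List Char} {u : String} (h : 0 ≤ PySem.Chars.find t u.toList) :
    pvMatchAt t u (PySem.Chars.find t u.toList).toNat = true := by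
  have := (PySem.Chars.find_spec (s:=t) (sub:=u.toList) h).1
  simpa [pvMatchAt, List.isPrefixOf_iff_prefix] using this

lemma pvMatchAt_false {t : List Char} {u : String} {j : Nat}
    (h : PySem.Chars.find t u.toList = -1 ∨ (j : Int) < PySem.Chars.find t u.toList) :
    pvMatchAt t u j = false := by
  rcases h with h | h
  · have hn := (PySem.Chars.find_eq_neg_one_iff t u.toList).1 h
    rw [pvMatchAt, Bool.eq_false_iff]
    intro hb
    exact hn ((PySem.Chars.isIn_iff_infix u.toList t).1
      ((PySem.Chars.exists_prefix_drop_iff_isIn u.toList t).1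
        ⟨j, List.isPrefixOf_iff_prefix.1 hb⟩))
  · have h0 : 0 ≤ PySem.Chars.find t u.toList := by omega
    have := (PySem.Chars.find_spec (s:=t) (sub:=u.toList) h0).2 j (by omega)
    rw [pvMatchAt, Bool.eq_false_iff]
    intro hb
    exact this (List.isPrefixOf_iff_prefix.1 hb)

lemma pvScan_none (subs : List String) (t : List Char) (ps : List Nat)
    (h : ∀ pos ∈ ps, ∀ s ∈ subs, pvMatchAt t s pos = false) :
    pvScan subs t ps = none := by
  induction ps with
  | nil => rfl
  | cons pos rest ih =>
    have hf : subs.find? (fun s => pvMatchAt t s pos) = none :=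
      List.find?_eq_none.2 (fun s hs => by simp [h pos (by simp) s hs])
    simp [pvScan, hf]
    exact ih (fun q hq s hs => h q (by simp [hq]) s hs)

lemma pvScan_append (subs : List String) (t : List Char) (l1 l2 : List Nat) :
    pvScan subs t (l1 ++ l2) =
      (match pvScan subs t l1 with
       | some r => some r
       | none => pvScan subs t l2) := by
  induction l1 with
  | nil => simp [pvScan]
  | cons pos rest ih =>
    simp only [List.cons_append, pvScan]
    cases subs.find? (fun s => pvMatchAt t s pos) <;> simp [ih]

lemma pvScan_range_eq (subs : List String) (t : List Char) (N j : Nat) (s : String)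
    (hj : j ≤ N)
    (hhit : subs.find? (fun u => pvMatchAt t u j) = some s)
    (hbefore : ∀ i < j, ∀ u ∈ subs, pvMatchAt t u i = false) :
    pvScan subs t (List.range (N + 1)) = some (j, s) := by
  have hsplit : List.range (N + 1) = List.range j ++ (j :: List.range' (j + 1) (N - j)) := by
    rw [List.range_eq_range', List.range_eq_range']
    have : N + 1 = j + (N - j + 1) := by omega
    rw [this, ← List.range'_append_1, List.range'_succ]; simp
  rw [hsplit, pvScan_append,
    pvScan_none subs t (List.range j)
      (fun i hi u hu => hbefore i (List.mem_range.1 hi) u hu)]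
  simp [pvScan, hhit]

set_option maxHeartbeats 1000000 in
lemma pvAlt_eq_sel (b e p t : String) : detect_next_inside_alt b e p t = pvSel b e p t := by
  unfold detect_next_inside_alt pvSel
  simp only [PySem.Str.find]
  have h0 := PySem.Chars.neg_one_le_find t.toList b.toList
  have h1 := PySem.Chars.neg_one_le_find t.toList e.toList
  have h2 := PySem.Chars.neg_one_le_find t.toList p.toList
  have hl0 := PySem.Chars.find_le_length t.toList b.toList
  have hl1 := PySem.Chars.find_le_length t.toList e.toList
  have hl2 := PySem.Chars.find_le_length t.toList p.toList
  set T := t.toList with hT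
  set n0 := PySem.Chars.find T b.toList with hn0
  set n1 := PySem.Chars.find T e.toList with hn1
  set n2 := PySem.Chars.find T p.toList with hn2
  by_cases c0 : 0 ≤ n0 ∧ (n1 = -1 ∨ n0 ≤ n1) ∧ (n2 = -1 ∨ n0 ≤ n2)
  · have hb : pvMatchAt T b n0.toNat = true := pvMatchAt_of_find (by omega)
    rw [pvScan_range_eq [b,e,p] T T.length n0.toNat b (by omega)
      (by simp [List.find?, hb])
      (by intro i hi u hu
          simp only [List.mem_cons, List.not_mem_nil, or_false] at hu
          rcases hu with rfl | rfl | rfl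
          · exact pvMatchAt_false (Or.inr (by omega))
          · exact pvMatchAt_false (by omega)
          · exact pvMatchAt_false (by omega)),
      if_pos c0]
    simp [Int.toNat_of_nonneg c0.1]
  · by_cases c1 : 0 ≤ n1 ∧ (n2 = -1 ∨ n1 ≤ n2)
    · have he : pvMatchAt T e n1.toNat = true := pvMatchAt_of_find (by omega)
      have hbF : pvMatchAt T b n1.toNat = false := pvMatchAt_false (by omega)
      rw [pvScan_range_eq [b,e,p] T T.length n1.toNat e (by omega)
        (by simp [List.find?, he, hbF])
        (by intro i hi u hu
            simp only [List.mem_cons, List.not_mem_nil, or_false] at hu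
            rcases hu with rfl | rfl | rfl
            · exact pvMatchAt_false (by omega)
            · exact pvMatchAt_false (by omega)
            · exact pvMatchAt_false (by omega)),
        if_neg c0, if_pos c1]
      simp [Int.toNat_of_nonneg c1.1]
    · by_cases c2 : 0 ≤ n2
      · have hp : pvMatchAt T p n2.toNat = true := pvMatchAt_of_find (by omega)
        have hbF : pvMatchAt T b n2.toNat = false := pvMatchAt_false (by omega)
        have heF : pvMatchAt T e n2.toNat = false := pvMatchAt_false (by omega)
        rw [pvScan_range_eq [b,e,p] T T.length n2.toNat p (by omega)
          (by simp [List.find?, hp, hbF, heF])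
          (by intro i hi u hu
              simp only [List.mem_cons, List.not_mem_nil, or_false] at hu
              rcases hu with rfl | rfl | rfl
              · exact pvMatchAt_false (by omega)
              · exact pvMatchAt_false (by omega)
              · exact pvMatchAt_false (by omega)),
          if_neg c0, if_neg c1, if_pos c2]
        simp [Int.toNat_of_nonneg c2]
      · rw [pvScan_none [b,e,p] T _
          (by intro pos _ u hu
              simp only [List.mem_cons, List.not_mem_nil, or_false] at hu
              rcases hu with rfl | rfl | rfl
              · exact pvMatchAt_false (Or.inl (by omega))
              · exact pvMatchAt_false (Or.inl (by omega))
              · exact pvMatchAt_false (Or.inl (by omega))),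
          if_neg c0, if_neg c1, if_neg c2]

set_option maxHeartbeats 1000000 in
set_option maxRecDepth 4096 in
lemma pvA_eq_sel (b e p t : String) : detect_next_inside b e p t = pvSel b e p t := by
  unfold detect_next_inside pvSel
  have g0 : PySem.List.pyGetD [b,e,p] 0 "" = b := rfl
  have g1 : PySem.List.pyGetD [b,e,p] 1 "" = e := rfl
  have g2 : PySem.List.pyGetD [b,e,p] 2 "" = p := rfl
  have h0 := PySem.Chars.neg_one_le_find t.toList b.toList
  have h1 := PySem.Chars.neg_one_le_find t.toList e.toList
  have h2 := PySem.Chars.neg_one_le_find t.toList p.toList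
  simp only [PySem.List.enumerate_cons, PySem.List.enumerate_nil, List.foldl, g0,
    PySem.Str.find_eq] at *
  norm_num [g1, g2]
  generalize PySem.Chars.find t.toList b.toList = n0 at *
  generalize PySem.Chars.find t.toList e.toList = n1 at *
  generalize PySem.Chars.find t.toList p.toList = n2 at *
  split_ifs <;> simp_all <;> omega

-- ===== VERDICT (by name: the statement is the Claim_ definition above) =====
theorem detect_next_inside_spec : Claim_equal_detect_next_inside := by
  intro b e p t _
  unfold Spec_detect_next_inside
  rw [pvA_eq_sel, pvAlt_eq_sel]
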